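-- pv_equiv track=rewrite | github.com/mariia-rybakova/AlbumDesigner | src/groups_operations/groups_management.py | check_time_based_split_needed
-- ===== SOURCE A (Python) =====
-- def check_time_based_split_needed(general_times_list, group_time_list, group_key):
--     if len(group_time_list) < 2:
--         return False, None
--     if group_key not in ['walking the aisle', 'bride', 'groom', 'bride and groom', 'groom party', 'bride party', 'portrait']:
--         return False, None
--
--     split_points = list()
--     for i in range(len(group_time_list) - 1):
--         start_time = group_time_list[i]
--         end_time = group_time_list[i + 1]
--
--         count_between = sum(start_time < t < end_time for t in general_times_list)
--
--         if count_between > 2: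
--             split_points.append(start_time)
--
--     if len(split_points) > 0:
--         return True, split_points
--
--     return False, None
-- ===== SOURCE B (Python) =====
-- def _bisect_left(a, x):
--     lo, hi = 0, len(a)
--     while lo < hi:
--         mid = (lo + hi) // 2
--         if a[mid] < x:
--             lo = mid + 1
--         else:
--             hi = mid
--     return lo
--
-- def _bisect_right(a, x):
--     lo, hi = 0, len(a)
--     while lo < hi:
--         mid = (lo + hi) // 2
--         if a[mid] <= x:
--             lo = mid + 1
--         else:
--             hi = mid
--     return lo
--
-- def check_time_based_split_needed(general_times_list, group_time_list, group_key):
--     if len(group_time_list) < 2: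
--         return False, None
--     if group_key not in ('walking the aisle', 'bride', 'groom', 'bride and groom', 'groom party', 'bride party', 'portrait'):
--         return False, None
--     gt = sorted(general_times_list)
--     split_points = [s for s, e in zip(group_time_list, group_time_list[1:])
--                     if _bisect_left(gt, e) - _bisect_right(gt, s) > 2]
--     if split_points:
--         return True, split_points
--     return False, None
-- ===== Notes on version B (the rewrite author's own statement) =====
-- stated objective: alternative
-- what changed: Instead of scanning the whole general_times_list for every consecutive pair, B sorts general_times_list once and counts the values strictly inside each interval with two hand-written binary searches (bisect_left/bisect_right), building the split points as one zip-comprehension; it trades the per-pair linear scans for an upfront sort.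
import Mathlib
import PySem

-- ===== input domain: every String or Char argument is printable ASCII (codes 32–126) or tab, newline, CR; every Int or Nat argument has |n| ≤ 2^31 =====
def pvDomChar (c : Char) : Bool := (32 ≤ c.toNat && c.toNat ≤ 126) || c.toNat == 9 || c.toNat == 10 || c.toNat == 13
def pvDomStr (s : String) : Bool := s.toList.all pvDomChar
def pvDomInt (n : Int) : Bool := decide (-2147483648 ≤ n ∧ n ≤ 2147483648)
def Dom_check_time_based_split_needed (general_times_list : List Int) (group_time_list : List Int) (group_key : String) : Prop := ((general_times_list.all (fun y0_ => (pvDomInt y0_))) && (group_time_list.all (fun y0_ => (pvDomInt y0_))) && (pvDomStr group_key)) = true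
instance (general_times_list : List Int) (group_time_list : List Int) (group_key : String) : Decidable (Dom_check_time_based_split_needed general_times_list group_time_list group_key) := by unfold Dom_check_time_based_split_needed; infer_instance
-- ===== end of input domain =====

-- B sorts general_times_list once and counts each interval with two hand-written binary
-- searches instead of rescanning the whole list per pair (objective: alternative).


-- ===== PORT A =====
def check_time_based_split_needed (general_times_list : List Int) (group_time_list : List Int) (group_key : String) : Bool × Option (List Int) :=
  if group_time_list.length < 2 then (false, none)
  else if ¬ (["walking the aisle", "bride", "groom", "bride and groom", "groom party", "bride party", "portrait"].contains group_key) then (false, none)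
  else
    let split_points :=
      (PySem.List.pyRange 0 ((group_time_list.length : Int) - 1) 1).foldl (fun acc i =>
        let start_time := PySem.List.pyGetD group_time_list i 0
        let end_time := PySem.List.pyGetD group_time_list (i + 1) 0
        let count_between := (general_times_list.map (fun t => if start_time < t ∧ t < end_time then (1 : Int) else 0)).sum
        if count_between > 2 then acc ++ [start_time] else acc) []
    if split_points.length > 0 then (true, some split_points) else (false, none)

-- ===== PORT B =====
-- hand-written bisect_left / bisect_right from Source B: while lo < hi, halve; fuel = initial hi
def pvBLLoop (xs : List Int) (x : Int) : Nat → Nat → Nat → Nat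
  | 0, lo, _ => lo
  | fuel + 1, lo, hi =>
    if lo < hi then
      match xs[(lo + hi) / 2]? with
      | some y => if y < x then pvBLLoop xs x fuel ((lo + hi) / 2 + 1) hi else pvBLLoop xs x fuel lo ((lo + hi) / 2)
      | none => lo
    else lo

def pvBRLoop (xs : List Int) (x : Int) : Nat → Nat → Nat → Nat
  | 0, lo, _ => lo
  | fuel + 1, lo, hi =>
    if lo < hi then
      match xs[(lo + hi) / 2]? with
      | some y => if y ≤ x then pvBRLoop xs x fuel ((lo + hi) / 2 + 1) hi else pvBRLoop xs x fuel lo ((lo + hi) / 2)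
      | none => lo
    else lo

def pvBisectLeft (xs : List Int) (x : Int) : Nat := pvBLLoop xs x xs.length 0 xs.length
def pvBisectRight (xs : List Int) (x : Int) : Nat := pvBRLoop xs x xs.length 0 xs.length

def check_time_based_split_needed_alt (general_times_list : List Int) (group_time_list : List Int) (group_key : String) : Bool × Option (List Int) :=
  if group_time_list.length < 2 then (false, none)
  else if ¬ (["walking the aisle", "bride", "groom", "bride and groom", "groom party", "bride party", "portrait"].contains group_key) then (false, none)
  else
    let gt := PySem.List.sorted general_times_list (fun x => x) false
    let split_points :=
      ((group_time_list.zip (PySem.List.slice group_time_list (some 1) none)).filter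
        (fun p => decide ((pvBisectLeft gt p.2 : Int) - (pvBisectRight gt p.1 : Int) > 2))).map (fun p => p.1)
    if split_points.length > 0 then (true, some split_points) else (false, none)

-- ===== PRECONDITION & SPEC =====
def Spec_check_time_based_split_needed (general_times_list : List Int) (group_time_list : List Int) (group_key : String) (out : Bool × Option (List Int)) : Prop := out = check_time_based_split_needed_alt general_times_list group_time_list group_key
instance (general_times_list : List Int) (group_time_list : List Int) (group_key : String) (out : Bool × Option (List Int)) : Decidable (Spec_check_time_based_split_needed general_times_list group_time_list group_key out) := by unfold Spec_check_time_based_split_needed; infer_instance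

-- ===== CLAIM (what is proved, stated in full; the proofs are below) =====
def Claim_equal_check_time_based_split_needed : Prop := ∀ (general_times_list : List Int) (group_time_list : List Int) (group_key : String), Dom_check_time_based_split_needed general_times_list group_time_list group_key → Spec_check_time_based_split_needed general_times_list group_time_list group_key (check_time_based_split_needed general_times_list group_time_list group_key)

-- ===== LEMMAS AND PROOFS =====

-- the hand-written loops are the PySem bisect loops
theorem pvBLLoop_eq (xs : List Int) (x : Int) (fuel lo hi : Nat) :
    pvBLLoop xs x fuel lo hi = PySem.List.bisectLeftLoop xs x fuel lo hi := by
  induction fuel generalizing lo hi with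
  | zero => simp [pvBLLoop, PySem.List.bisectLeftLoop]
  | succ n ih =>
    simp only [pvBLLoop, PySem.List.bisectLeftLoop, ih]
    split
    · cases hx : xs[(lo + hi) / 2]? with
      | none => rfl
      | some y => by_cases hy : y < x <;> simp [hy]
    · rfl

theorem pvBRLoop_eq (xs : List Int) (x : Int) (fuel lo hi : Nat) :
    pvBRLoop xs x fuel lo hi = PySem.List.bisectRightLoop xs x fuel lo hi := by
  induction fuel generalizing lo hi with
  | zero => simp [pvBRLoop, PySem.List.bisectRightLoop]
  | succ n ih =>
    simp only [pvBRLoop, PySem.List.bisectRightLoop, ih]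
    split
    · cases hx : xs[(lo + hi) / 2]? with
      | none => rfl
      | some y =>
        by_cases hy : y ≤ x
        · simp [hy, not_lt.mpr hy]
        · simp [hy, not_le.mp hy]
    · rfl

theorem pvBisectLeft_eq (xs : List Int) (x : Int) : pvBisectLeft xs x = PySem.List.bisectLeft xs x := by
  simp [pvBisectLeft, PySem.List.bisectLeft, pvBLLoop_eq]

theorem pvBisectRight_eq (xs : List Int) (x : Int) : pvBisectRight xs x = PySem.List.bisectRight xs x := by
  simp [pvBisectRight, PySem.List.bisectRight, pvBRLoop_eq]

-- a position whose prefix satisfies p and whose suffix refutes p is the countP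
theorem countP_of_split (xs : List Int) (p : Int → Bool) (k : Nat) (hk : k ≤ xs.length)
    (h1 : ∀ (j : Nat) (hj : j < xs.length), j < k → p xs[j])
    (h2 : ∀ (j : Nat) (hj : j < xs.length), k ≤ j → p xs[j] = false) :
    xs.countP p = k := by
  have hsplit : xs = xs.take k ++ xs.drop k := (List.take_append_drop k xs).symm
  rw [hsplit, List.countP_append]
  have htake : (xs.take k).countP p = (xs.take k).length := by
    rw [List.countP_eq_length]
    intro a ha
    obtain ⟨i, hi, rfl⟩ := List.getElem_of_mem ha
    have hi' : i < k := lt_of_lt_of_le hi (by simp)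
    have hix : i < xs.length := lt_of_lt_of_le hi' hk
    have := h1 i hix hi'
    simpa [List.getElem_take] using this
  have hdrop : (xs.drop k).countP p = 0 := by
    rw [List.countP_eq_zero]
    intro a ha
    obtain ⟨i, hi, rfl⟩ := List.getElem_of_mem ha
    have hix : k + i < xs.length := by
      have := hi; simp [List.length_drop] at this; omega
    have := h2 (k + i) hix (by omega)
    simp [List.getElem_drop]
    simpa [List.getElem_drop] using this
  rw [htake, hdrop]
  simp [List.length_take, Nat.min_eq_left hk]

theorem bisectLeft_countP (xs : List Int) (x : Int) (hs : xs.Pairwise (· ≤ ·)) :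
    xs.countP (fun t => decide (t < x)) = PySem.List.bisectLeft xs x := by
  obtain ⟨hle, h1, h2⟩ := PySem.List.bisectLeft_spec xs x hs
  exact countP_of_split xs _ _ hle
    (fun j hj hjk => by simpa using h1 j hj hjk)
    (fun j hj hkj => by simpa using h2 j hj hkj)

theorem bisectRight_countP (xs : List Int) (x : Int) (hs : xs.Pairwise (· ≤ ·)) :
    xs.countP (fun t => decide (t ≤ x)) = PySem.List.bisectRight xs x := by
  obtain ⟨hle, h1, h2⟩ := PySem.List.bisectRight_spec xs x hs
  exact countP_of_split xs _ _ hle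
    (fun j hj hjk => by simpa using h1 j hj hjk)
    (fun j hj hkj => by simpa [not_le] using h2 j hj hkj)

-- countP(< e) − countP(≤ s) exceeds 2 iff the strict-between count does
theorem count_between_split (s e : Int) (h : s < e) (l : List Int) :
    l.countP (fun t => decide (t < e)) =
      l.countP (fun t => decide (t ≤ s)) + l.countP (fun t => decide (s < t ∧ t < e)) := by
  induction l with
  | nil => simp
  | cons a l ih =>
    by_cases h1 : a < e
    · by_cases h2 : a ≤ s
      · simp [ih, h1, h2, show ¬ s < a by omega]
        omega
      · simp [ih, h1, h2, show s < a by omega]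
        omega
    · simp [List.countP_cons, ih, h1]
      omega

theorem count_between_zero (s e : Int) (h : ¬ s < e) (l : List Int) :
    l.countP (fun t => decide (s < t ∧ t < e)) = 0 := by
  rw [List.countP_eq_zero]
  intro a _
  simp; intro hsa; omega

theorem count_mono (s e : Int) (h : ¬ s < e) (l : List Int) :
    l.countP (fun t => decide (t < e)) ≤ l.countP (fun t => decide (t ≤ s)) := by
  apply List.countP_mono_left
  intro a _ ha
  simp at ha ⊢
  omega

theorem cond_iff (g : List Int) (s e : Int) :
    (decide ((pvBisectLeft (PySem.List.sorted g (fun x => x) false) e : Int)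
        - (pvBisectRight (PySem.List.sorted g (fun x => x) false) s : Int) > 2))
      = decide (((g.map (fun t => if s < t ∧ t < e then (1 : Int) else 0)).sum) > 2) := by
  set gt := PySem.List.sorted g (fun x => x) false with hgt
  have hpair : gt.Pairwise (· ≤ ·) := by
    simpa using PySem.List.sorted_pairwise g (fun x => x)
  have hperm : gt.Perm g := PySem.List.sorted_perm g (fun x => x) false
  have hsum : (g.map (fun t => if s < t ∧ t < e then (1 : Int) else 0)).sum
      = (g.countP (fun t => decide (s < t ∧ t < e)) : Int) := by
    rw [← PySem.List.sum_map_ite_one_zero (fun t => decide (s < t ∧ t < e)) g]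
    simp
  have hbl : pvBisectLeft gt e = gt.countP (fun t => decide (t < e)) := by
    rw [pvBisectLeft_eq, ← bisectLeft_countP gt e hpair]
  have hbr : pvBisectRight gt s = gt.countP (fun t => decide (t ≤ s)) := by
    rw [pvBisectRight_eq, ← bisectRight_countP gt s hpair]
  have hc : gt.countP (fun t => decide (s < t ∧ t < e)) = g.countP (fun t => decide (s < t ∧ t < e)) :=
    hperm.countP_eq _
  rw [hsum, hbl, hbr, decide_eq_decide]
  by_cases hse : s < e
  · rw [count_between_split s e hse gt, hc]
    push_cast
    omega
  · have h0 := count_between_zero s e hse g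
    have hm := count_mono s e hse gt
    rw [h0]
    push_cast
    rw [iff_false]
    omega

-- zip with the tail, as a map over indices
theorem zip_drop_eq (l : List Int) :
    l.zip (l.drop 1) = (List.range (l.length - 1)).map (fun i => (l.getD i 0, l.getD (i + 1) 0)) := by
  apply List.ext_getElem
  · simp [List.length_zip]
  · intro i h1 h2
    have hlen : i < l.length - 1 := by simpa using h2
    have hi1 : i + 1 < l.length := by omega
    have hi : i < l.length := by omega
    simp [List.getElem_zip, List.getD_eq_getElem?_getD, List.getElem?_eq_getElem hi,
      List.getElem?_eq_getElem hi1]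

-- ===== VERDICT (by name: the statement is the Claim_ definition above) =====
theorem check_time_based_split_needed_spec : Claim_equal_check_time_based_split_needed := by
  intro g grl key _
  unfold Spec_check_time_based_split_needed check_time_based_split_needed check_time_based_split_needed_alt
  split_ifs with h1 h2
  · rfl
  case neg => rfl
  case pos =>
    -- the guards passed on both sides; show the two split_points lists coincide
    have hA : (PySem.List.pyRange 0 ((grl.length : Int) - 1) 1).foldl (fun acc i =>
        let start_time := PySem.List.pyGetD grl i 0
        let end_time := PySem.List.pyGetD grl (i + 1) 0
        let count_between := (g.map (fun t => if start_time < t ∧ t < end_time then (1 : Int) else 0)).sum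
        if count_between > 2 then acc ++ [start_time] else acc) []
        = ((grl.zip (PySem.List.slice grl (some 1) none)).filter
            (fun p => decide ((pvBisectLeft (PySem.List.sorted g (fun x => x) false) p.2 : Int)
              - (pvBisectRight (PySem.List.sorted g (fun x => x) false) p.1 : Int) > 2))).map (fun p => p.1) := by
      rw [PySem.List.slice_from_one]
      rw [← List.drop_one, zip_drop_eq]
      have hrange : PySem.List.pyRange 0 ((grl.length : Int) - 1) 1
          = (List.range (grl.length - 1)).map (fun k : Nat => (k : Int)) := by
        rw [PySem.List.pyRange_one]
        have : (((grl.length : Int) - 1) - 0).toNat = grl.length - 1 := by omega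
        rw [this]
        simp
      have hfold : ∀ (L : List Int) (acc : List Int), L.foldl (fun acc i =>
          let start_time := PySem.List.pyGetD grl i 0
          let end_time := PySem.List.pyGetD grl (i + 1) 0
          let count_between := (g.map (fun t => if start_time < t ∧ t < end_time then (1 : Int) else 0)).sum
          if count_between > 2 then acc ++ [start_time] else acc) acc
          = acc ++ (L.filter (fun i => decide ((g.map (fun t => if PySem.List.pyGetD grl i 0 < t ∧ t < PySem.List.pyGetD grl (i + 1) 0 then (1 : Int) else 0)).sum > 2))).map (fun i => PySem.List.pyGetD grl i 0) := by
        intro L acc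
        simpa using PySem.List.foldl_append_if
          (p := fun i => decide ((g.map (fun t => if PySem.List.pyGetD grl i 0 < t ∧ t < PySem.List.pyGetD grl (i + 1) 0 then (1 : Int) else 0)).sum > 2))
          (f := fun i => PySem.List.pyGetD grl i 0) (l := L) (acc := acc)
      rw [hfold, hrange, List.filter_map, List.map_map, List.filter_map, List.map_map]
      simp only [List.nil_append]
      have hpred : ∀ i ∈ List.range (grl.length - 1),
          ((fun i => decide ((g.map (fun t => if PySem.List.pyGetD grl i 0 < t ∧ t < PySem.List.pyGetD grl (i + 1) 0 then (1 : Int) else 0)).sum > 2)) ∘ (fun k : Nat => (k : Int))) i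
            = ((fun p : Int × Int => decide ((pvBisectLeft (PySem.List.sorted g (fun x => x) false) p.2 : Int)
                - (pvBisectRight (PySem.List.sorted g (fun x => x) false) p.1 : Int) > 2)) ∘ (fun i => (grl.getD i 0, grl.getD (i + 1) 0))) i := by
        intro i hi
        have hg1 : PySem.List.pyGetD grl ((i : Nat) : Int) 0 = grl.getD i 0 := PySem.List.pyGetD_natCast grl i 0
        have hg2 : PySem.List.pyGetD grl ((i : Int) + 1) 0 = grl.getD (i + 1) 0 := by
          have := PySem.List.pyGetD_natCast grl (i + 1) 0
          simpa using this
        simp only [Function.comp_apply, hg1, hg2]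
        exact (cond_iff g (grl.getD i 0) (grl.getD (i + 1) 0)).symm
      rw [List.filter_congr hpred]
      apply List.map_congr_left
      intro i hi
      have hi' : i ∈ List.range (grl.length - 1) := List.mem_of_mem_filter hi
      have hg1 : PySem.List.pyGetD grl ((i : Nat) : Int) 0 = grl.getD i 0 := PySem.List.pyGetD_natCast grl i 0
      simp only [Function.comp_apply, hg1]
    simp only [hA]
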